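-- pv_equiv track=rewrite | github.com/08183080/pre-boofuzz | net-pre/trys/get_seqs.py | split_list_by_user
-- ===== SOURCE A (Python) =====
-- def split_list_by_user(lst):
--     result = []
--     current_list = []
--
--     for item in lst:
--         if item.startswith("USER"):
--             if current_list:
--                 result.append(current_list)
--                 current_list = []
--         current_list.append(item)
--
--     if current_list:
--         result.append(current_list)
--
--     return result
-- ===== SOURCE B (Python) =====
-- def split_list_by_user(lst):
--     starts = [i for i, item in enumerate(lst) if i == 0 or item.startswith("USER")]
--     ends = starts[1:] + [len(lst)]
--     return [lst[s:e] for s, e in zip(starts, ends)]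
-- ===== Notes on version B (the rewrite author's own statement) =====
-- stated objective: alternative
-- what changed: Replaces A's single accumulator loop (flush current group when a USER item arrives) by a two-pass index computation: first collect the start indices (0 and every later index whose item starts with 'USER'), then emit the slices between consecutive start indices.
import Mathlib
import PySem

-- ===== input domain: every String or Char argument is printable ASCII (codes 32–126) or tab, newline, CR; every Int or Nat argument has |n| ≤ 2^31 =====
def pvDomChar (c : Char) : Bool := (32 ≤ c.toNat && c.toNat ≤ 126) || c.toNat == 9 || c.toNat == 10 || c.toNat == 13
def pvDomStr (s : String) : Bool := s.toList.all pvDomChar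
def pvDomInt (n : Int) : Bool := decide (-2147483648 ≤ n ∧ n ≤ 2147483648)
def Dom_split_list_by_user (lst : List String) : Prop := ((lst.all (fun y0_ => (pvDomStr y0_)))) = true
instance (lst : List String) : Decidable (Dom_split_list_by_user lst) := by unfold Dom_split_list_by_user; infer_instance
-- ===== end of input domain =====

-- B replaces A's flush-on-USER accumulator loop by a two-pass scheme (collect start
-- indices, then slice between consecutive starts); alternative decomposition, same cost.


-- ===== PORT A =====
def split_list_by_user (lst : List String) : List (List String) :=
  let s := lst.foldl
    (fun (acc : List (List String) × List String) item =>
      if PySem.Str.startswith item "USER" && !acc.2.isEmpty then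
        (acc.1 ++ [acc.2], [item])
      else (acc.1, acc.2 ++ [item]))
    ([], [])
  if !s.2.isEmpty then s.1 ++ [s.2] else s.1

-- ===== PORT B =====
def split_list_by_user_alt (lst : List String) : List (List String) :=
  let starts := ((PySem.List.enumerate lst 0).filter
      (fun q => q.1 == 0 || PySem.Str.startswith q.2 "USER")).map Prod.fst
  let ends := starts.drop 1 ++ [(lst.length : Int)]
  (starts.zip ends).map (fun q => PySem.List.slice lst (some q.1) (some q.2))

-- ===== PRECONDITION & SPEC =====
def Spec_split_list_by_user (lst : List String) (out : List (List String)) : Prop := out = split_list_by_user_alt lst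
instance (lst : List String) (out : List (List String)) : Decidable (Spec_split_list_by_user lst out) := by unfold Spec_split_list_by_user; infer_instance

-- ===== CLAIM (what is proved, stated in full; the proofs are below) =====
def Claim_equal_split_list_by_user : Prop := ∀ (lst : List String), Dom_split_list_by_user lst → Spec_split_list_by_user lst (split_list_by_user lst)

-- ===== LEMMAS AND PROOFS =====

-- Common recursive characterisation: each group is a head item plus the following
-- non-USER items.
def pvSpec : List String → List (List String)
  | [] => []
  | x :: xs =>
    (x :: xs.takeWhile (fun y => !PySem.Str.startswith y "USER")) ::
      pvSpec (xs.dropWhile (fun y => !PySem.Str.startswith y "USER"))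
termination_by l => l.length
decreasing_by
  simpa using Nat.lt_succ_of_le (List.length_dropWhile_le _ _)

theorem pvA_loop (lst : List String) (res : List (List String)) (cur : List String)
    (h : cur ≠ []) :
    (let s := lst.foldl
        (fun (acc : List (List String) × List String) item =>
          if PySem.Str.startswith item "USER" && !acc.2.isEmpty then
            (acc.1 ++ [acc.2], [item])
          else (acc.1, acc.2 ++ [item]))
        (res, cur)
      if !s.2.isEmpty then s.1 ++ [s.2] else s.1)
    = res ++ ((cur ++ lst.takeWhile (fun y => !PySem.Str.startswith y "USER")) ::
        pvSpec (lst.dropWhile (fun y => !PySem.Str.startswith y "USER"))) := by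
  induction lst generalizing res cur with
  | nil =>
      simp only [List.foldl_nil, List.takeWhile_nil, List.dropWhile_nil]
      have : cur.isEmpty = false := by simpa [List.isEmpty_iff] using h
      simp [this, pvSpec]
  | cons x xs ih =>
      have hspec : pvSpec (x :: xs) =
          (x :: List.takeWhile (fun y => !PySem.Str.startswith y "USER") xs) ::
            pvSpec (List.dropWhile (fun y => !PySem.Str.startswith y "USER") xs) := by
        rw [pvSpec]
      by_cases hU : PySem.Str.startswith x "USER"
      · have hc : cur.isEmpty = false := by simpa [List.isEmpty_iff] using h
        simp only [List.foldl_cons, hU, hc, Bool.not_false, Bool.and_self, if_true]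
        rw [ih (res ++ [cur]) [x] (by simp)]
        simp only [List.takeWhile_cons, List.dropWhile_cons, hU, Bool.not_true,
          Bool.false_eq_true, if_false, hspec, List.nil_append, List.append_nil,
          List.append_assoc, List.cons_append]
      · have hU' : PySem.Str.startswith x "USER" = false := by simpa using hU
        simp only [List.foldl_cons, hU', Bool.false_and, Bool.false_eq_true, if_false]
        rw [ih res (cur ++ [x]) (by simp)]
        simp only [List.takeWhile_cons, List.dropWhile_cons, hU', Bool.not_false, if_true,
          List.append_assoc, List.cons_append, List.nil_append]

theorem pvA_eq_spec (lst : List String) : split_list_by_user lst = pvSpec lst := by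
  cases lst with
  | nil => simp [split_list_by_user, pvSpec]
  | cons x xs =>
      unfold split_list_by_user
      simp only [List.foldl_cons, List.isEmpty_nil, Bool.not_true, Bool.and_false,
        Bool.false_eq_true, if_false, List.nil_append]
      rw [pvSpec]
      refine (pvA_loop xs [] [x] (by simp)).trans ?_
      simp

-- start indices of USER items, enumerating from s
def pvU (s : Int) (xs : List String) : List Int :=
  ((PySem.List.enumerate xs s).filter
    (fun q => PySem.Str.startswith q.2 "USER")).map Prod.fst

def pvStarts (lst : List String) : List Int :=
  ((PySem.List.enumerate lst 0).filter
    (fun q => q.1 == 0 || PySem.Str.startswith q.2 "USER")).map Prod.fst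

theorem pvU_cons (s : Int) (x : String) (xs : List String) :
    pvU s (x :: xs) =
      (if PySem.Str.startswith x "USER" then [s] else []) ++ pvU (s+1) xs := by
  unfold pvU
  rw [PySem.List.enumerate_cons, List.filter_cons]
  simp only [PySem.Str.startswith_eq]
  split <;> simp_all

theorem pvU_shift (xs : List String) (s : Int) :
    pvU s xs = (pvU 0 xs).map (· + s) := by
  induction xs generalizing s with
  | nil => simp [pvU, PySem.List.enumerate_nil]
  | cons x xs ih =>
      rw [pvU_cons, pvU_cons, ih (s+1), ih (0+1), List.map_append, List.map_map]
      congr 1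
      · split <;> simp
      · refine List.map_congr_left (fun a _ => ?_)
        simp only [Function.comp_apply]
        omega

theorem pvU_append (s : Int) (t r : List String)
    (h : ∀ y ∈ t, PySem.Str.startswith y "USER" = false) :
    pvU s (t ++ r) = pvU (s + t.length) r := by
  induction t generalizing s with
  | nil => simp
  | cons y t ih =>
      have hlen : (s + ((y :: t).length : Int)) = (s + 1) + (t.length : Int) := by
        rw [List.length_cons]; push_cast; ring
      rw [List.cons_append, pvU_cons, h y (by simp), hlen,
        ih (s+1) (fun z hz => h z (by simp [hz]))]
      simp

theorem pvU_nonneg (s : Int) (xs : List String) (hs : 0 ≤ s) :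
    ∀ i ∈ pvU s xs, 0 ≤ i := by
  intro i hi
  unfold pvU at hi
  obtain ⟨q, hq, rfl⟩ := List.mem_map.1 hi
  obtain ⟨k, hk, rfl⟩ := (PySem.List.mem_enumerate_iff _ _ _).1 (List.mem_filter.1 hq).1
  simp only
  omega

theorem pvStarts_cons (x : String) (xs : List String) :
    pvStarts (x :: xs) = 0 :: pvU 1 xs := by
  unfold pvStarts pvU
  rw [PySem.List.enumerate_cons, List.filter_cons]
  have hfc : ∀ q ∈ PySem.List.enumerate xs (0+1),
      (q.1 == (0:Int) || PySem.Str.startswith q.2 "USER")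
        = PySem.Str.startswith q.2 "USER" := by
    intro q hq
    obtain ⟨k, hk, rfl⟩ := (PySem.List.mem_enumerate_iff _ _ _).1 hq
    simp
    intro hcontra
    exact absurd hcontra (by omega)
  rw [List.filter_congr hfc]
  norm_num

theorem pvSlice_shift (l1 l2 : List String) (k a b : Int) (hk : k = (l1.length : Int))
    (ha : 0 ≤ a) (hb : 0 ≤ b) :
    PySem.List.slice (l1 ++ l2) (some (a + k)) (some (b + k))
      = PySem.List.slice l2 (some a) (some b) := by
  subst hk
  rw [PySem.List.slice_toNat _ (by omega) (by omega), PySem.List.slice_toNat _ ha hb]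
  have h1 : (a + (l1.length:Int)).toNat = a.toNat + l1.length := by omega
  have h2 : (b + (l1.length:Int)).toNat = b.toNat + l1.length := by omega
  rw [h1, h2, List.drop_append]
  have h3 : l1.drop (a.toNat + l1.length) = [] := by
    apply List.drop_eq_nil_of_le; omega
  have h4 : a.toNat + l1.length - l1.length = a.toNat := by omega
  rw [h3, h4, List.nil_append]
  congr 1
  omega

theorem pvB_def (l : List String) :
    split_list_by_user_alt l =
      ((pvStarts l).zip ((pvStarts l).drop 1 ++ [(l.length : Int)])).map
        (fun q => PySem.List.slice l (some q.1) (some q.2)) := rfl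

theorem pvSlice_all (l : List String) :
    PySem.List.slice l (some 0) (some (l.length : Int)) = l := by
  rw [PySem.List.slice_toNat _ (by omega) (by omega)]
  simp

theorem pvB_step (x : String) (xs : List String) :
    split_list_by_user_alt (x :: xs) =
      (x :: xs.takeWhile (fun y => !PySem.Str.startswith y "USER")) ::
        split_list_by_user_alt (xs.dropWhile (fun y => !PySem.Str.startswith y "USER")) := by
  set t := xs.takeWhile (fun y => !PySem.Str.startswith y "USER") with htdef
  set r := xs.dropWhile (fun y => !PySem.Str.startswith y "USER") with hrdef
  have hxs : t ++ r = xs := List.takeWhile_append_dropWhile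
  have ht : ∀ y ∈ t, PySem.Str.startswith y "USER" = false := by
    intro y hy
    simpa using List.mem_takeWhile_imp hy
  have hU1 : pvU 1 xs = (pvU 0 r).map (· + (1 + (t.length : Int))) := by
    rw [← hxs, pvU_append 1 t r ht, pvU_shift]
  cases hr : r with
  | nil =>
      have hxs' : xs = t := by rw [← hxs, hr, List.append_nil]
      have hU1' : pvU 1 xs = [] := by
        rw [hU1, hr]
        rfl
      rw [pvB_def, pvStarts_cons, hU1']
      have hd : List.drop 1 [(0:Int)] = [] := rfl
      simp only [hd, List.nil_append, List.zip_cons_cons, List.zip_nil_right,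
        List.map_cons, List.map_nil]
      rw [pvSlice_all, hxs']
      rfl
  | cons y ys =>
      rw [← hr]
      have hUy : PySem.Str.startswith y "USER" = true := by
        have h0 := List.head?_dropWhile_not (fun z => !PySem.Str.startswith z "USER") xs
        rw [← hrdef, hr] at h0
        simpa using h0
      have hS : pvU 0 r = pvStarts r := by
        rw [hr, pvU_cons, hUy, pvStarts_cons]
        norm_num
      set k : Int := 1 + (t.length : Int) with hkdef
      have hk' : k = ((x :: t).length : Int) := by
        rw [hkdef, List.length_cons]
        push_cast
        ring
      have hxxs : x :: xs = (x :: t) ++ r := by rw [← hxs]; rfl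
      have hL : ((x :: xs).length : Int) = (r.length : Int) + k := by
        rw [hxxs, hkdef, List.length_append, List.length_cons]
        push_cast
        ring
      have hSr : pvStarts r = 0 :: pvU 1 ys := by rw [hr, pvStarts_cons]
      set A := pvU 1 ys with hAdef
      have hAnn : ∀ i ∈ A, (0:Int) ≤ i := pvU_nonneg 1 ys (by norm_num)
      rw [pvB_def (x :: xs), pvStarts_cons, hU1, hS, pvB_def r, hSr, List.map_cons]
      simp only [List.drop_succ_cons, List.drop_zero]
      rw [List.cons_append, List.zip_cons_cons, List.map_cons]
      congr 1
      · -- head slice is x :: t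
        rw [hxxs, PySem.List.slice_toNat _ le_rfl (by omega)]
        have h5 : ((0:Int) + k).toNat - (0:Int).toNat = (x :: t).length := by omega
        rw [h5]
        simp
      · -- remaining slices are exactly B r's slices, shifted by k
        have hmap2 : List.map (fun v : Int => v + k) A ++ [((x :: xs).length : Int)]
            = List.map (fun v : Int => v + k) (A ++ [(r.length : Int)]) := by
          rw [List.map_append, hL]
          rfl
        have hcons : ((0:Int) + k) :: List.map (fun v : Int => v + k) A
            = List.map (fun v : Int => v + k) (0 :: A) := by simp
        rw [hmap2, hcons, List.zip_map, List.map_map]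
        apply List.map_congr_left
        rintro ⟨a, b⟩ hq
        obtain ⟨ha, hb⟩ := List.of_mem_zip hq
        have ha0 : 0 ≤ a := by
          rcases List.mem_cons.1 ha with h' | h'
          · omega
          · exact hAnn a h'
        have hb0 : 0 ≤ b := by
          rcases List.mem_append.1 hb with h' | h'
          · exact hAnn b h'
          · simp at h'
            omega
        simp only [Function.comp_apply, Prod.map_apply]
        rw [hxxs]
        exact pvSlice_shift (x :: t) r k a b hk' ha0 hb0

theorem pvB_eq_spec (lst : List String) : split_list_by_user_alt lst = pvSpec lst := by
  have main : ∀ (n : Nat) (l : List String), l.length ≤ n →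
      split_list_by_user_alt l = pvSpec l := by
    intro n
    induction n with
    | zero =>
        intro l hl
        have : l = [] := List.eq_nil_of_length_eq_zero (by omega)
        subst this
        rw [pvSpec]
        rfl
    | succ n ih =>
        intro l hl
        cases l with
        | nil => rw [pvSpec]; rfl
        | cons x xs =>
            rw [pvB_step, pvSpec]
            congr 1
            exact ih _ (le_trans (List.length_dropWhile_le _ _)
              (by simp at hl; omega))
  exact main lst.length lst le_rfl

-- ===== VERDICT (by name: the statement is the Claim_ definition above) =====
theorem split_list_by_user_spec : Claim_equal_split_list_by_user := by
  intro lst _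
  unfold Spec_split_list_by_user
  rw [pvA_eq_spec, pvB_eq_spec]
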